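-- pv_equiv track=rewrite | github.com/asharanees/Tokemizer-Project | backend/services/repetition.py | _extend_sequence
-- ===== SOURCE A (Python) =====
-- from typing import Dict, Iterable, List, Sequence, Tuple
--
-- def _extend_sequence(
--     tokens: Sequence[str], starts: Iterable[int], base_length: int
-- ) -> int:
--     """Extend a repeated sequence while all occurrences remain identical."""
--
--     max_length = base_length
--     starts = list(starts)
--     token_count = len(tokens)
--
--     while True:
--         next_tokens = []
--         for start in starts:
--             next_index = start + max_length
--             if next_index >= token_count:
--                 next_tokens.append(None)
--             else:
--                 next_tokens.append(tokens[next_index])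
--
--         unique_next = set(next_tokens)
--         if len(unique_next) != 1:
--             break
--
--         next_token = unique_next.pop()
--         if next_token is None:
--             break
--
--         max_length += 1
--
--     return max_length
-- ===== SOURCE B (Python) =====
-- def _extend_sequence(tokens, starts, base_length):
--     """Extend a repeated sequence while all occurrences remain identical."""
--     starts = list(starts)
--     if not starts:
--         return base_length
--     token_count = len(tokens)
--     ref = starts[0]
--     bound = token_count - max(starts) - base_length
--     best = bound if bound > 0 else 0
--     rb = ref + base_length
--     for start in starts[1:]:
--         sb = start + base_length
--         if sb == rb:
--             continue
--         i = 0
--         while i < best and tokens[rb + i] == tokens[sb + i]: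
--             i += 1
--         if i < best:
--             best = i
--     return base_length + best
-- ===== Notes on version B (the rewrite author's own statement) =====
-- stated objective: faster
-- what changed: A repeatedly extends an offset, rebuilding a list and a set of the next token of every occurrence per step; B precomputes the off-the-end bound from max(starts), skips occurrences that coincide with the reference, and for each remaining occurrence scans its match length against the reference suffix, returning base_length plus the minimum.
import Mathlib
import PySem

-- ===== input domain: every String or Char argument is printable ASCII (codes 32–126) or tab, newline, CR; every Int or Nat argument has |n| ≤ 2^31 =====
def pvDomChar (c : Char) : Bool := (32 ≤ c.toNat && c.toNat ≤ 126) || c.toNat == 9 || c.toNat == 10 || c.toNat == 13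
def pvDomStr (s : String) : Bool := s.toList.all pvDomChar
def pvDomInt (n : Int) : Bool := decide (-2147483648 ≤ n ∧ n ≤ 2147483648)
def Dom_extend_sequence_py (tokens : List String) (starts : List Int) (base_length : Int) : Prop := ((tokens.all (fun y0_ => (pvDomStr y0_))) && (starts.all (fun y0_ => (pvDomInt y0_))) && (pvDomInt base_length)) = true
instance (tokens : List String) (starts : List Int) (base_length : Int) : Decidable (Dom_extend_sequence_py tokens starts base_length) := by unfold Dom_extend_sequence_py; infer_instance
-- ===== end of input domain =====

-- B replaces A's per-offset list+set construction over all occurrences by a precomputed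
-- off-the-end bound (from max(starts)) and a per-occurrence match-length scan against the
-- reference suffix, skipping occurrences equal to the reference; objective: faster
-- (measured; duplicate-heavy start lists no longer rescan per duplicate).

-- ===== PORT A =====
-- tokens[next_index] for next_index < token_count (negative indices wrap; IndexError = none, excluded by Pre_)
def pvNextTok (tokens : List String) (ml s : Int) : Option String :=
  if s + ml ≥ (tokens.length : Int) then none else PySem.List.pyGet? tokens (s + ml)

-- the 'while True' loop of A: next_tokens per start, set, break unless a single non-None token
def pvLoopA (tokens : List String) (starts : List Int) (ml : Int) : Int :=
  if h1 : (PySem.Set.ofList (starts.map (pvNextTok tokens ml))).length ≠ 1 then ml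
  else if h2 : (PySem.Set.ofList (starts.map (pvNextTok tokens ml))).headD none = none then ml
  else pvLoopA tokens starts (ml + 1)
termination_by ((tokens.length : Int) - ml - (match starts with | [] => 0 | a :: t => t.foldl max a)).toNat
decreasing_by
  · -- the single element of the set is `some _`, so every next index is < token_count
    rcases List.length_eq_one_iff.mp (not_not.mp h1) with ⟨x, hx⟩
    rw [hx] at h2
    simp only [List.headD_cons] at h2
    rcases starts with _ | ⟨a, t⟩
    · simp [PySem.Set.ofList_nil] at hx
    · have hmem : (t.foldl max a) ∈ a :: t :=
        PySem.List.max?_mem (PySem.List.max?_id_cons a t)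
      have hmem3 : pvNextTok tokens ml (t.foldl max a) ∈
          PySem.Set.ofList ((a :: t).map (pvNextTok tokens ml)) :=
        (PySem.Set.mem_ofList _ _).mpr (List.mem_map_of_mem hmem)
      rw [hx] at hmem3
      simp only [List.mem_singleton] at hmem3
      rw [← hmem3] at h2
      unfold pvNextTok at h2
      by_cases hge : t.foldl max a + ml ≥ (tokens.length : Int)
      · simp [hge] at h2
      · simp only []
        omega

def extend_sequence_py (tokens : List String) (starts : List Int) (base_length : Int) : Int :=
  pvLoopA tokens starts base_length

-- ===== PORT B =====
-- the inner 'while i < best and tokens[rb+i] == tokens[sb+i]: i += 1' of B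
def pvMatchLen (tokens : List String) (rb sb : Int) (i best : Int) : Int :=
  if h : i < best ∧ PySem.List.pyGet? tokens (rb + i) = PySem.List.pyGet? tokens (sb + i) then
    pvMatchLen tokens rb sb (i + 1) best
  else i
termination_by (best - i).toNat
decreasing_by omega

def extend_sequence_py_alt (tokens : List String) (starts : List Int) (base_length : Int) : Int :=
  match starts with
  | [] => base_length
  | r :: rest =>
    let token_count : Int := tokens.length
    let bound := token_count - rest.foldl max r - base_length
    let best0 := if bound > 0 then bound else 0
    let rb := r + base_length
    let best := rest.foldl
      (fun best s =>
        let sb := s + base_length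
        if sb = rb then best
        else
          let i := pvMatchLen tokens rb sb 0 best
          if i < best then i else best) best0
    base_length + best

-- ===== PRECONDITION & SPEC =====
-- Pre_ excludes exactly the inputs on which A raises IndexError: some occurrence start plus
-- base_length is below -len(tokens), reached on the loop's very first pass.
def Pre_extend_sequence_py (tokens : List String) (starts : List Int) (base_length : Int) : Prop :=
  ∀ s ∈ starts, -(tokens.length : Int) ≤ s + base_length
instance (tokens : List String) (starts : List Int) (base_length : Int) : Decidable (Pre_extend_sequence_py tokens starts base_length) := by unfold Pre_extend_sequence_py; infer_instance

def pvWitness_extend_sequence_py : List String × List Int × Int := (["a", "b", "a", "b"], [0, 2], 1)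

def Spec_extend_sequence_py (tokens : List String) (starts : List Int) (base_length : Int) (out : Int) : Prop := out = extend_sequence_py_alt tokens starts base_length
instance (tokens : List String) (starts : List Int) (base_length : Int) (out : Int) : Decidable (Spec_extend_sequence_py tokens starts base_length out) := by unfold Spec_extend_sequence_py; infer_instance

-- ===== CLAIM (what is proved, stated in full; the proofs are below) =====
def Claim_equal_extend_sequence_py : Prop := ∀ (tokens : List String) (starts : List Int) (base_length : Int), Dom_extend_sequence_py tokens starts base_length → Pre_extend_sequence_py tokens starts base_length → Spec_extend_sequence_py tokens starts base_length (extend_sequence_py tokens starts base_length)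

-- ===== LEMMAS AND PROOFS =====

-- A's loop continues exactly when the next tokens form a one-element set {some t}
def pvGood (tokens : List String) (starts : List Int) (ml : Int) : Prop :=
  ∃ t, PySem.Set.ofList (starts.map (pvNextTok tokens ml)) = [some t]

theorem pvLoopA_of_good (tokens : List String) (starts : List Int) (ml : Int)
    (h : pvGood tokens starts ml) :
    pvLoopA tokens starts ml = pvLoopA tokens starts (ml + 1) := by
  obtain ⟨t, ht⟩ := h
  rw [pvLoopA, ht]
  simp

theorem pvLoopA_of_not_good (tokens : List String) (starts : List Int) (ml : Int)
    (h : ¬ pvGood tokens starts ml) :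
    pvLoopA tokens starts ml = ml := by
  rw [pvLoopA]
  split_ifs with h1 h2
  · rfl
  · rfl
  · exfalso
    rcases List.length_eq_one_iff.mp (not_not.mp h1) with ⟨x, hx⟩
    rw [hx] at h2
    simp only [List.headD_cons] at h2
    rcases x with _ | t
    · exact h2 rfl
    · exact h ⟨t, hx⟩

theorem pv_ofList_cons_eq_singleton {α : Type} [BEq α] [LawfulBEq α] (a x : α) (l : List α) :
    PySem.Set.ofList (a :: l) = [x] ↔ x = a ∧ ∀ y ∈ l, y = a := by
  rw [PySem.Set.ofList_cons]
  constructor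
  · intro h
    rw [List.cons_eq_cons] at h
    obtain ⟨h1, h2⟩ := h
    subst h1
    refine ⟨rfl, fun y hy => ?_⟩
    by_contra hne
    have : y ∈ PySem.Set.discard (PySem.Set.ofList l) a := by
      rw [PySem.Set.mem_discard]
      exact ⟨(PySem.Set.mem_ofList _ _).mpr hy, hne⟩
    rw [h2] at this
    exact (List.not_mem_nil) this
  · rintro ⟨rfl, hall⟩
    have hd : PySem.Set.discard (PySem.Set.ofList l) x = [] := by
      rw [List.eq_nil_iff_forall_not_mem]
      intro y hy
      rw [PySem.Set.mem_discard] at hy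
      exact hy.2 (hall y ((PySem.Set.mem_ofList _ _).mp hy.1))
    rw [hd]

theorem pvNextTok_eq_pyGet (tokens : List String) (ml s : Int) :
    pvNextTok tokens ml s = PySem.List.pyGet? tokens (s + ml) := by
  unfold pvNextTok
  split_ifs with hge
  · symm
    rw [PySem.List.pyGet?_eq_none_iff]
    simp [PySem.Raise.InRange]
    omega
  · rfl

theorem pvGood_iff (tokens : List String) (r : Int) (rest : List Int) (ml : Int)
    (hPre : ∀ s ∈ r :: rest, -(tokens.length : Int) ≤ s + ml) :
    pvGood tokens (r :: rest) ml ↔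
      (r + ml < (tokens.length : Int) ∧
       ∀ s ∈ rest, PySem.List.pyGet? tokens (s + ml) = PySem.List.pyGet? tokens (r + ml)) := by
  unfold pvGood
  simp only [List.map_cons]
  constructor
  · rintro ⟨t, ht⟩
    rw [pv_ofList_cons_eq_singleton] at ht
    obtain ⟨hta, hall⟩ := ht
    have hr : PySem.List.pyGet? tokens (r + ml) = some t := by
      rw [← pvNextTok_eq_pyGet, ← hta]
    have hrlt : r + ml < (tokens.length : Int) := by
      by_contra hge
      have hnone : PySem.List.pyGet? tokens (r + ml) = none := by
        rw [PySem.List.pyGet?_eq_none_iff]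
        simp [PySem.Raise.InRange]
        omega
      rw [hr] at hnone
      cases hnone
    refine ⟨hrlt, fun s hs => ?_⟩
    have hy := hall _ (List.mem_map_of_mem hs)
    rw [pvNextTok_eq_pyGet, pvNextTok_eq_pyGet] at hy
    exact hy
  · rintro ⟨hrlt, hall⟩
    have hrpre := hPre r (List.mem_cons_self)
    have hne : PySem.List.pyGet? tokens (r + ml) ≠ none := by
      rw [Ne, PySem.List.pyGet?_eq_none_iff]
      simp [PySem.Raise.InRange]
      omega
    obtain ⟨t, ht⟩ := Option.ne_none_iff_exists'.mp hne
    refine ⟨t, ?_⟩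
    rw [pv_ofList_cons_eq_singleton]
    constructor
    · rw [pvNextTok_eq_pyGet, ht]
    · intro y hy
      rw [List.mem_map] at hy
      obtain ⟨s, hs, rfl⟩ := hy
      rw [pvNextTok_eq_pyGet, pvNextTok_eq_pyGet]
      exact hall s hs

theorem pvLoopA_eq_add (tokens : List String) (starts : List Int) :
    ∀ (k : Nat) (ml : Int),
      (∀ i : Nat, i < k → pvGood tokens starts (ml + i)) →
      ¬ pvGood tokens starts (ml + k) →
      pvLoopA tokens starts ml = ml + k := by
  intro k
  induction k with
  | zero =>
    intro ml _ hbad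
    rw [pvLoopA_of_not_good tokens starts ml (by simpa using hbad)]
    simp
  | succ k ih =>
    intro ml hgood hbad
    rw [pvLoopA_of_good tokens starts ml (by simpa using hgood 0 (Nat.succ_pos k))]
    have h1 : ∀ i : Nat, i < k → pvGood tokens starts (ml + 1 + i) := by
      intro i hi
      have e : ml + 1 + (i : Int) = ml + ((i + 1 : Nat) : Int) := by push_cast; ring
      rw [e]
      exact hgood _ (by omega)
    have h2 : ¬ pvGood tokens starts (ml + 1 + k) := by
      have e : ml + 1 + (k : Int) = ml + ((k + 1 : Nat) : Int) := by push_cast; ring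
      rw [e]
      exact hbad
    rw [ih (ml + 1) h1 h2]
    push_cast
    ring

theorem pvMatchLen_spec (tokens : List String) (rb sb : Int) :
    ∀ (d : Nat) (i best : Int), (best - i).toNat = d → 0 ≤ i →
      i ≤ pvMatchLen tokens rb sb i best ∧
      (i ≤ best → pvMatchLen tokens rb sb i best ≤ best) ∧
      (∀ j : Int, i ≤ j → j < pvMatchLen tokens rb sb i best →
        PySem.List.pyGet? tokens (rb + j) = PySem.List.pyGet? tokens (sb + j)) ∧
      (i ≤ best →
        (pvMatchLen tokens rb sb i best = best ∨
          PySem.List.pyGet? tokens (rb + pvMatchLen tokens rb sb i best) ≠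
            PySem.List.pyGet? tokens (sb + pvMatchLen tokens rb sb i best))) := by
  intro d
  induction d using Nat.strong_induction_on with
  | _ d ih =>
    intro i best hd hi
    rw [pvMatchLen]
    split_ifs with h
    · have hd' : (best - (i + 1)).toNat < d := by omega
      obtain ⟨H1, H2, H3, H4⟩ := ih _ hd' (i + 1) best rfl (by omega)
      refine ⟨by omega, fun _ => H2 (by omega), ?_, fun _ => H4 (by omega)⟩
      intro j hij hjm
      rcases eq_or_lt_of_le hij with rfl | hlt
      · exact h.2
      · exact H3 j (by omega) hjm
    · refine ⟨le_refl i, fun h2 => h2, fun j hij hjm => by omega, fun hib => ?_⟩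
      rcases lt_or_ge i best with hlt | hge
      · right
        intro heq
        exact h ⟨hlt, heq⟩
      · left
        omega

-- the loop body of B's 'for start in starts[1:]' (definitionally the fold step in extend_sequence_py_alt)
def pvFoldStep (tokens : List String) (r base : Int) : Int → Int → Int :=
  fun best s =>
    if s + base = r + base then best
    else
      let i := pvMatchLen tokens (r + base) (s + base) 0 best
      if i < best then i else best

theorem pv_alt_eq (tokens : List String) (r : Int) (rest : List Int) (base : Int) :
    extend_sequence_py_alt tokens (r :: rest) base =
      base + rest.foldl (pvFoldStep tokens r base)
        (if (tokens.length : Int) - rest.foldl max r - base > 0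
         then (tokens.length : Int) - rest.foldl max r - base else 0) := rfl

theorem pvFold_spec (tokens : List String) (r base : Int) :
    ∀ (l : List Int) (cur : Int), 0 ≤ cur →
      0 ≤ l.foldl (pvFoldStep tokens r base) cur ∧
      l.foldl (pvFoldStep tokens r base) cur ≤ cur ∧
      (∀ s ∈ l, ∀ j : Int, 0 ≤ j → j < l.foldl (pvFoldStep tokens r base) cur →
        PySem.List.pyGet? tokens (r + base + j) = PySem.List.pyGet? tokens (s + base + j)) ∧
      (l.foldl (pvFoldStep tokens r base) cur = cur ∨
       ∃ s ∈ l, PySem.List.pyGet? tokens (r + base + l.foldl (pvFoldStep tokens r base) cur) ≠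
          PySem.List.pyGet? tokens (s + base + l.foldl (pvFoldStep tokens r base) cur)) := by
  intro l
  induction l with
  | nil =>
    intro cur hcur
    exact ⟨hcur, le_refl cur, by simp, Or.inl rfl⟩
  | cons s l ih =>
    intro cur hcur
    by_cases hsr : s + base = r + base
    · have hstep : pvFoldStep tokens r base cur s = cur := by
        unfold pvFoldStep
        rw [if_pos hsr]
      simp only [List.foldl_cons, hstep]
      obtain ⟨F1, F2, F3, F4⟩ := ih cur hcur
      refine ⟨F1, F2, ?_, ?_⟩
      · intro s' hs' j hj hjr
        rcases List.mem_cons.mp hs' with rfl | hmem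
        · rw [hsr]
        · exact F3 s' hmem j hj hjr
      · rcases F4 with heq | ⟨s', hs', hmis⟩
        · left; exact heq
        · right; exact ⟨s', List.mem_cons_of_mem s hs', hmis⟩
    obtain ⟨M1, M2, M3, M4⟩ :=
      pvMatchLen_spec tokens (r + base) (s + base) (cur - 0).toNat 0 cur rfl (le_refl 0)
    have hm2 := M2 hcur
    have ha : pvFoldStep tokens r base cur s = pvMatchLen tokens (r + base) (s + base) 0 cur := by
      unfold pvFoldStep
      rw [if_neg hsr]
      by_cases hh : pvMatchLen tokens (r + base) (s + base) 0 cur < cur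
      · simp [hh]
      · simp only [hh, if_false]
        omega
    simp only [List.foldl_cons, ha]
    obtain ⟨F1, F2, F3, F4⟩ := ih (pvMatchLen tokens (r + base) (s + base) 0 cur) M1
    refine ⟨F1, by omega, ?_, ?_⟩
    · intro s' hs' j hj hjr
      rcases List.mem_cons.mp hs' with rfl | hmem
      · exact M3 j hj (by omega)
      · exact F3 s' hmem j hj hjr
    · rcases F4 with heq | ⟨s', hs', hmis⟩
      · rcases M4 hcur with hmb | hmis
        · left; omega
        · right
          exact ⟨s, List.mem_cons_self, by rw [heq]; exact hmis⟩
      · right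
        exact ⟨s', List.mem_cons_of_mem s hs', hmis⟩

-- ===== VERDICT (by name: the statement is the Claim_ definition above) =====
theorem extend_sequence_py_spec : Claim_equal_extend_sequence_py := by
  intro tokens starts base _hDom hPre
  unfold Spec_extend_sequence_py
  unfold Pre_extend_sequence_py at hPre
  show pvLoopA tokens starts base = extend_sequence_py_alt tokens starts base
  rcases starts with _ | ⟨r, rest⟩
  · rw [pvLoopA_of_not_good]
    · rfl
    · rintro ⟨t, ht⟩
      simp [PySem.Set.ofList_nil] at ht
  · rw [pv_alt_eq]
    set n : Int := (tokens.length : Int) with hn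
    set m0 : Int := rest.foldl max r with hm0
    set bound0 : Int := n - m0 - base with hb0
    set cur : Int := if bound0 > 0 then bound0 else 0 with hcur
    set best : Int := rest.foldl (pvFoldStep tokens r base) cur with hbest
    have hm0mem : m0 ∈ r :: rest := PySem.List.max?_mem (PySem.List.max?_id_cons r rest)
    have hm0ge : ∀ y ∈ r :: rest, y ≤ m0 := fun y hy =>
      PySem.List.max?_isMax (PySem.List.max?_id_cons r rest) y hy
    have hcur0 : 0 ≤ cur := by rw [hcur]; split_ifs <;> omega
    have hb0cur : bound0 ≤ cur := by rw [hcur]; split_ifs <;> omega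
    obtain ⟨F1, F2, F3, F4⟩ := pvFold_spec tokens r base rest cur hcur0
    have hgood_iff : ∀ i : Int, 0 ≤ i →
        (pvGood tokens (r :: rest) (base + i) ↔
          (m0 + base + i < n ∧ ∀ s ∈ rest,
            PySem.List.pyGet? tokens (s + (base + i)) =
              PySem.List.pyGet? tokens (r + (base + i)))) := by
      intro i hi
      rw [pvGood_iff tokens r rest (base + i) (fun s hs => by have := hPre s hs; omega)]
      constructor
      · rintro ⟨hrlt, hall⟩
        refine ⟨?_, hall⟩
        have hm0lt : m0 + (base + i) < n := by
          rcases List.mem_cons.mp hm0mem with he | hs'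
          · omega
          · have heq := hall m0 hs'
            by_contra hge
            have hnone : PySem.List.pyGet? tokens (m0 + (base + i)) = none := by
              rw [PySem.List.pyGet?_eq_none_iff]
              simp [PySem.Raise.InRange]
              omega
            have hrne : PySem.List.pyGet? tokens (r + (base + i)) ≠ none := by
              rw [Ne, PySem.List.pyGet?_eq_none_iff]
              have := hPre r List.mem_cons_self
              simp [PySem.Raise.InRange]
              omega
            rw [heq] at hnone
            exact hrne hnone
        omega
      · rintro ⟨hm0lt, hall⟩
        have := hm0ge r List.mem_cons_self
        exact ⟨by omega, hall⟩
    have hA : pvLoopA tokens (r :: rest) base = base + best := by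
      have hk : ((best.toNat : Int)) = best := Int.toNat_of_nonneg F1
      have hres := pvLoopA_eq_add tokens (r :: rest) best.toNat base ?good ?bad
      · rw [hres, hk]
      case good =>
        intro i hi
        have hi' : (i : Int) < best := by omega
        rw [show base + (i : Int) = base + (i : Int) from rfl, hgood_iff i (by omega)]
        constructor
        · have hcb : cur = bound0 := by
            rw [hcur]
            split_ifs with hpos
            · rfl
            · omega
          omega
        · intro s hs
          have he := F3 s hs i (by omega) (by omega)
          rw [show s + (base + (i : Int)) = s + base + i by ring,
              show r + (base + (i : Int)) = r + base + i by ring]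
          exact he.symm
      case bad =>
        intro hg
        rw [hk, hgood_iff best F1] at hg
        obtain ⟨hlt, hall⟩ := hg
        rcases F4 with hbc | ⟨s, hs, hmis⟩
        · omega
        · refine hmis ?_
          have := hall s hs
          rw [show s + (base + best) = s + base + best by ring,
              show r + (base + best) = r + base + best by ring] at this
          exact this.symm
    exact hA
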